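-- pv_equiv track=rewrite | github.com/cyyeh/ds-algo | archived/Coursera UCSanDiego/algorithmic toolbox/week5/2_primitive_calculator/primitive_calculator.py | optimal_sequence
-- ===== SOURCE A (Python) =====
-- def optimal_sequence(n):
--     sequence = [0] * (n + 1)
--     sequence[1] = 1
--     sequence_dict = {
--         "1": [1]
--     }
--
--     for i in range(2, n + 1):
--         sequence[i] = n + 1
--         sequence_dict[str(i)] = []
--         if i - 1 > 0:
--             num_sequence = sequence[i - 1] + 1
--             if num_sequence < sequence[i]:
--                 sequence[i] = num_sequence
--                 sequence_dict[str(i)] = sequence_dict[str(i - 1)] + [i]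
--         if i % 3 == 0:
--             num_sequence = sequence[i // 3] + 1
--             if num_sequence < sequence[i]:
--                 sequence[i] = num_sequence
--                 sequence_dict[str(i)] = sequence_dict[str(i // 3)] + [i]
--         if i % 2 == 0:
--             num_sequence = sequence[i // 2] + 1
--             if num_sequence < sequence[i]:
--                 sequence[i] = num_sequence
--                 sequence_dict[str(i)] = sequence_dict[str(i // 2)] + [i]
--
--     return sequence_dict[str(n)]
-- ===== SOURCE B (Python) =====
-- def optimal_sequence(n):
--     cost = [0] * (n + 1)
--     parent = [0] * (n + 1)
--     cost[1] = 1
--     for i in range(2, n + 1):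
--         p = i - 1
--         if i % 3 == 0 and cost[i // 3] < cost[p]:
--             p = i // 3
--         if i % 2 == 0 and cost[i // 2] < cost[p]:
--             p = i // 2
--         cost[i] = cost[p] + 1
--         parent[i] = p
--     path = []
--     i = n
--     while i > 1:
--         path.append(i)
--         i = parent[i]
--     path.append(1)
--     return path[::-1]
-- ===== Notes on version B (the rewrite author's own statement) =====
-- stated objective: faster
-- what changed: Replaces A's dict of full paths keyed by str(i) (a path list copied for every node) with an O(n) parent-pointer DP and a single backward path reconstruction at the end, keeping A's tie-break order (+1, //3, //2).
-- outside the precondition, e.g. on optimal_sequence(0): A raises IndexError, B raises IndexError; on optimal_sequence(-2): A raises IndexError, B raises IndexError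
import Mathlib
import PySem

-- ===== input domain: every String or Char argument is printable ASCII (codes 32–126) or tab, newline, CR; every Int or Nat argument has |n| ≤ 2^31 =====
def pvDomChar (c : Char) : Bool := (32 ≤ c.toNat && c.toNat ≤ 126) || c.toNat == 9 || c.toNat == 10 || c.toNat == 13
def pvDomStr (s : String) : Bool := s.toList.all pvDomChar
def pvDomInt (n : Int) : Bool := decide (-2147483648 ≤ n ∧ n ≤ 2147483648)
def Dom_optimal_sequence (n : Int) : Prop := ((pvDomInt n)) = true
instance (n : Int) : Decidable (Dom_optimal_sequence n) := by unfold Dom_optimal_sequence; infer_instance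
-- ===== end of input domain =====

-- B replaces A's dict of full paths (str-keyed, a path list copied at every node) by an
-- O(n) parent-pointer DP with one backward reconstruction; measured faster.
-- Python lists are ported as Array Int (O(1) indexing/assignment like Python's list) and
-- A's dict as Std.HashMap (O(1) lookup/insert like Python's dict); both are exact on the
-- admitted inputs (Pre_), where every index/key accessed is present and non-negative.

-- xs[i] and xs[i] = v for the in-range non-negative indices these programs use
def pvAGet (a : Array Int) (i : Int) : Int := a.getD i.toNat 0
def pvASet (a : Array Int) (i : Int) (v : Int) : Array Int := a.setIfInBounds i.toNat v

-- ===== PORT A =====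
-- one loop iteration of A (sequence table + dict of paths keyed by str(i))
def pvStepA (n : Int) (st : Array Int × Std.HashMap String (List Int)) (i : Int) :
    Array Int × Std.HashMap String (List Int) :=
  let seq := pvASet st.1 i (n + 1)
  let dict := st.2.insert (PySem.Int.toStr i) []
  let st1 :=
    if i - 1 > 0 then
      let num := pvAGet seq (i - 1) + 1
      if num < pvAGet seq i then
        (pvASet seq i num,
         dict.insert (PySem.Int.toStr i) (dict.getD (PySem.Int.toStr (i - 1)) [] ++ [i]))
      else (seq, dict)
    else (seq, dict)
  let st2 :=
    if PySem.Int.mod i 3 = 0 then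
      let num := pvAGet st1.1 (PySem.Int.floordiv i 3) + 1
      if num < pvAGet st1.1 i then
        (pvASet st1.1 i num,
         st1.2.insert (PySem.Int.toStr i)
           (st1.2.getD (PySem.Int.toStr (PySem.Int.floordiv i 3)) [] ++ [i]))
      else st1
    else st1
  if PySem.Int.mod i 2 = 0 then
    let num := pvAGet st2.1 (PySem.Int.floordiv i 2) + 1
    if num < pvAGet st2.1 i then
      (pvASet st2.1 i num,
       st2.2.insert (PySem.Int.toStr i)
         (st2.2.getD (PySem.Int.toStr (PySem.Int.floordiv i 2)) [] ++ [i]))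
    else st2
  else st2

def optimal_sequence (n : Int) : List Int :=
  -- sequence = [0]*(n+1); sequence[1] = 1  (IndexError on non-positive n: excluded by Pre_)
  let seq := pvASet (Array.replicate (n + 1).toNat (0 : Int)) 1 1
  let dict : Std.HashMap String (List Int) := (∅ : Std.HashMap String (List Int)).insert "1" [1]
  let st := (PySem.List.pyRange 2 (n + 1) 1).foldl (pvStepA n) (seq, dict)
  st.2.getD (PySem.Int.toStr n) []

-- ===== PORT B =====
-- one loop iteration of B: pick the predecessor p (ties to the earlier candidate), record cost and parent
def pvStepB (st : Array Int × Array Int) (i : Int) : Array Int × Array Int :=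
  let cost := st.1
  let p := i - 1
  let p := if PySem.Int.mod i 3 = 0 ∧
              pvAGet cost (PySem.Int.floordiv i 3) < pvAGet cost p
           then PySem.Int.floordiv i 3 else p
  let p := if PySem.Int.mod i 2 = 0 ∧
              pvAGet cost (PySem.Int.floordiv i 2) < pvAGet cost p
           then PySem.Int.floordiv i 2 else p
  (pvASet cost i (pvAGet cost p + 1), pvASet st.2 i p)

-- the 'while i > 1' reconstruction walk, with a fuel bound for totality
-- (on the parent tables B builds, parent[i] < i, so fuel n.toNat is always enough)
def pvWalk (parent : Array Int) : Nat → Int → List Int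
  | 0, _ => []
  | fuel + 1, i =>
      if i > 1 then i :: pvWalk parent fuel (pvAGet parent i) else []

def optimal_sequence_alt (n : Int) : List Int :=
  -- cost = [0]*(n+1); parent = [0]*(n+1); cost[1] = 1  (IndexError on non-positive n: excluded by Pre_)
  let cost := pvASet (Array.replicate (n + 1).toNat (0 : Int)) 1 1
  let parent := Array.replicate (n + 1).toNat (0 : Int)
  let st := (PySem.List.pyRange 2 (n + 1) 1).foldl pvStepB (cost, parent)
  (pvWalk st.2 n.toNat n ++ [1]).reverse

-- ===== PRECONDITION & SPEC =====
-- Python A raises IndexError (the initial write into the length-(n+1) sequence list is out of range) whenever n is not positive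
def Pre_optimal_sequence (n : Int) : Prop := 1 ≤ n
instance (n : Int) : Decidable (Pre_optimal_sequence n) := by unfold Pre_optimal_sequence; infer_instance
def pvWitness_optimal_sequence : Int := (5)

def Spec_optimal_sequence (n : Int) (out : List Int) : Prop := out = optimal_sequence_alt n
instance (n : Int) (out : List Int) : Decidable (Spec_optimal_sequence n out) := by unfold Spec_optimal_sequence; infer_instance

-- ===== CLAIM (what is proved, stated in full; the proofs are below) =====
def Claim_equal_optimal_sequence : Prop := ∀ (n : Int), Dom_optimal_sequence n → Pre_optimal_sequence n → Spec_optimal_sequence n (optimal_sequence n)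

-- ===== LEMMAS AND PROOFS =====

-- toStr is injective on the nonnegative integers (dict keys str(1..n) are distinct)
lemma pvDigitChar (d : Nat) (h : d < 10) : (Nat.digitChar d).toNat - 48 = d := by
  interval_cases d <;> rfl

lemma pvDecCore : ∀ (fuel n : Nat) (ds : List Char), n < fuel →
    (Nat.toDigitsCore 10 fuel n ds).foldl (fun a c => a * 10 + (c.toNat - 48)) 0
      = ds.foldl (fun a c => a * 10 + (c.toNat - 48)) n := by
  intro fuel
  induction fuel with
  | zero => intro n ds h; omega
  | succ f ih =>
    intro n ds h
    rw [Nat.toDigitsCore]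
    by_cases h0 : n / 10 = 0
    · have hn : n < 10 := by omega
      simp only [h0, if_true]
      simp only [List.foldl]
      rw [pvDigitChar (n % 10) (by omega)]
      congr 1
      omega
    · rw [if_neg h0]
      rw [ih (n / 10) _ (by omega)]
      simp only [List.foldl]
      rw [pvDigitChar (n % 10) (by omega)]
      congr 1
      omega

lemma pvToDigitsInj (a b : Nat) (h : Nat.toDigits 10 a = Nat.toDigits 10 b) : a = b := by
  have ha := pvDecCore (a + 1) a [] (by omega)
  have hb := pvDecCore (b + 1) b [] (by omega)
  unfold Nat.toDigits at h
  rw [h] at ha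
  simp only [List.foldl] at ha hb
  omega

lemma pvToStrInj (a b : Int) (ha : 0 ≤ a) (hb : 0 ≤ b)
    (h : PySem.Int.toStr a = PySem.Int.toStr b) : a = b := by
  unfold PySem.Int.toStr PySem.Int.toChars at h
  rw [if_neg (by omega), if_neg (by omega)] at h
  have h2 : Nat.toDigits 10 a.toNat = Nat.toDigits 10 b.toNat := by
    have := congrArg String.toList h
    simpa using this
  have := pvToDigitsInj _ _ h2
  omega

-- table access lemmas
lemma pvLenSet (a : Array Int) (i v : Int) : (pvASet a i v).size = a.size :=
  Array.size_setIfInBounds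

lemma pvGetSet_self (a : Array Int) (i v : Int) (_h0 : 0 ≤ i) (h : i.toNat < a.size) :
    pvAGet (pvASet a i v) i = v := by
  unfold pvAGet pvASet
  rw [Array.getD_eq_getD_getElem?, Array.getElem?_setIfInBounds]
  simp [h]

lemma pvGetSet_ne (a : Array Int) (i j v : Int) (h0 : 0 ≤ i) (hj : 0 ≤ j) (hne : j ≠ i) :
    pvAGet (pvASet a i v) j = pvAGet a j := by
  unfold pvAGet pvASet
  rw [Array.getD_eq_getD_getElem?, Array.getD_eq_getD_getElem?,
      Array.getElem?_setIfInBounds, if_neg (by omega)]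

lemma pvSetSet (a : Array Int) (i x y : Int) :
    pvASet (pvASet a i x) i y = pvASet a i y := by
  unfold pvASet
  apply Array.ext_getElem?
  intro j
  simp only [Array.getElem?_setIfInBounds, Array.size_setIfInBounds]
  split_ifs <;> rfl

-- walk/table abbreviations used only by the proofs
def pvGood (p : Array Int) (t : Int) : Prop :=
  ∀ j : Int, 2 ≤ j → j < t → 1 ≤ pvAGet p j ∧ pvAGet p j < j

-- the joint loop invariant: after processing i = 2 .. t-1, A's cost table equals B's, costs are
-- bounded by their index, parents are in [1, j), and A's stored path for j is B's reconstruction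
def pvInv (n t : Int) (A : Array Int × Std.HashMap String (List Int))
    (B : Array Int × Array Int) : Prop :=
  A.1 = B.1 ∧ B.1.size = (n + 1).toNat ∧ B.2.size = (n + 1).toNat ∧
  (∀ j : Int, 1 ≤ j → j < t → pvAGet B.1 j ≤ j) ∧
  pvGood B.2 t ∧
  (∀ j : Int, 1 ≤ j → j < t →
    A.2.getD (PySem.Int.toStr j) [] = (pvWalk B.2 j.toNat j ++ [1]).reverse)

lemma pvWalk_le_one (p : Array Int) (f : Nat) (i : Int) (h : i ≤ 1) : pvWalk p f i = [] := by
  cases f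
  · rfl
  · simp only [pvWalk, if_neg (by omega : ¬ i > 1)]

lemma pvWalk_congr (p p' : Array Int) (t : Int) (hg : pvGood p t)
    (hagree : ∀ k : Int, 2 ≤ k → k < t → pvAGet p' k = pvAGet p k) :
    ∀ (f : Nat) (j : Int), 1 ≤ j → j < t → pvWalk p' f j = pvWalk p f j := by
  intro f
  induction f with
  | zero => intro j _ _; rfl
  | succ f ih =>
    intro j hj1 hjt
    by_cases hj : j > 1
    · have h2 : 2 ≤ j := by omega
      simp only [pvWalk, if_pos hj]
      rw [hagree j h2 hjt]
      have hq := hg j h2 hjt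
      rw [ih _ (hq.1) (by omega)]
    · simp only [pvWalk, if_neg hj]

lemma pvWalk_fuel (p : Array Int) (t : Int) (hg : pvGood p t) :
    ∀ (f : Nat) (j : Int) (g : Nat), 1 ≤ j → j < t → j.toNat ≤ f + 1 → j.toNat ≤ g + 1 →
      pvWalk p f j = pvWalk p g j := by
  intro f
  induction f with
  | zero => intro j g hj1 hjt hf hgf
            rw [pvWalk_le_one p 0 j (by omega), pvWalk_le_one p g j (by omega)]
  | succ f ih =>
    intro j g hj1 hjt hf hgf
    by_cases hj : j > 1
    · have h2 : 2 ≤ j := by omega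
      obtain ⟨g', rfl⟩ : ∃ g', g = g' + 1 := ⟨g - 1, by omega⟩
      simp only [pvWalk, if_pos hj]
      have hq := hg j h2 hjt
      rw [ih _ g' (hq.1) (by omega) (by omega) (by omega)]
    · rw [pvWalk_le_one p _ j (by omega), pvWalk_le_one p g j (by omega)]

-- one step of the combined invariant, abstracted over the chosen predecessor pp
lemma pvInv_next (n i pp : Int) (c p : Array Int) (d d' : Std.HashMap String (List Int))
    (h2 : 2 ≤ i) (hn : i ≤ n)
    (hI : pvInv n i (c, d) (c, p)) (hpp1 : 1 ≤ pp) (hppi : pp < i)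
    (hD : ∀ s, d'.getD s [] =
      (d.insert (PySem.Int.toStr i) (d.getD (PySem.Int.toStr pp) [] ++ [i])).getD s []) :
    pvInv n (i + 1)
      (pvASet c i (pvAGet c pp + 1), d')
      (pvASet c i (pvAGet c pp + 1), pvASet p i pp) := by
  obtain ⟨-, hlc, hlp, hcost, hgood, hpath⟩ := hI
  dsimp only at hlc hlp hcost hgood hpath
  have hi0 : (0:Int) ≤ i := by omega
  have hilen : i.toNat < c.size := by omega
  have hiplen : i.toNat < p.size := by omega
  refine ⟨rfl, by rw [pvLenSet]; exact hlc, by rw [pvLenSet]; exact hlp, ?_, ?_, ?_⟩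
  · intro j hj1 hjt
    by_cases hji : j = i
    · subst hji
      rw [pvGetSet_self c j _ hi0 hilen]
      have := hcost pp hpp1 hppi
      omega
    · rw [pvGetSet_ne c i j _ hi0 (by omega) hji]
      exact hcost j hj1 (by omega)
  · intro j hj2 hjt
    by_cases hji : j = i
    · subst hji
      rw [pvGetSet_self p j _ hi0 hiplen]
      exact ⟨hpp1, hppi⟩
    · rw [pvGetSet_ne p i j _ hi0 (by omega) hji]
      exact hgood j hj2 (by omega)
  · intro j hj1 hjt
    have hagree : ∀ k : Int, 2 ≤ k → k < i →
        pvAGet (pvASet p i pp) k = pvAGet p k :=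
      fun k hk1 hk2 => pvGetSet_ne p i k _ hi0 (by omega) (by omega)
    rw [hD, Std.HashMap.getD_insert]
    by_cases hji : j = i
    · subst hji
      rw [if_pos (by simp), hpath pp hpp1 hppi]
      obtain ⟨m, hm⟩ : ∃ m, j.toNat = m + 1 := ⟨j.toNat - 1, by omega⟩
      rw [hm]
      simp only [pvWalk, if_pos (show j > 1 by omega)]
      rw [pvGetSet_self p j pp hi0 hiplen]
      rw [pvWalk_congr p (pvASet p j pp) j hgood
            (fun k hk1 hk2 => pvGetSet_ne p j k pp hi0 (by omega) (by omega)) m pp hpp1 hppi]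
      rw [pvWalk_fuel p j hgood m pp pp.toNat hpp1 hppi (by omega) (by omega)]
      simp
    · rw [if_neg (by
        simp only [beq_iff_eq]
        exact fun hc => hji (pvToStrInj j i (by omega) (by omega) hc.symm))]
      rw [hpath j hj1 (by omega)]
      rw [pvWalk_congr p (pvASet p i pp) i hgood hagree j.toNat j hj1 (by omega)]

-- B's predecessor choice at i, as a standalone function (proof helper)
def pvPick (c : Array Int) (i : Int) : Int :=
  let p := i - 1
  let p := if PySem.Int.mod i 3 = 0 ∧
              pvAGet c (PySem.Int.floordiv i 3) < pvAGet c p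
           then PySem.Int.floordiv i 3 else p
  if PySem.Int.mod i 2 = 0 ∧
      pvAGet c (PySem.Int.floordiv i 2) < pvAGet c p
  then PySem.Int.floordiv i 2 else p

lemma pvStepB_eq (c p : Array Int) (i : Int) :
    pvStepB (c, p) i =
      (pvASet c i (pvAGet c (pvPick c i) + 1), pvASet p i (pvPick c i)) := rfl

lemma pvFd3_bounds (i : Int) (h2 : 2 ≤ i) (hm : PySem.Int.mod i 3 = 0) :
    1 ≤ PySem.Int.floordiv i 3 ∧ PySem.Int.floordiv i 3 < i := by
  have hdvd : (3:Int) ∣ i := (PySem.Int.mod_eq_zero_iff_dvd i 3).mp hm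
  have h3 : 3 ≤ i := by omega
  constructor
  · exact (PySem.Int.le_floordiv_iff_mul_le (by norm_num)).mpr (by omega)
  · exact (PySem.Int.floordiv_lt_iff_lt_mul (by norm_num)).mpr (by omega)

lemma pvFd2_bounds (i : Int) (h2 : 2 ≤ i) (hm : PySem.Int.mod i 2 = 0) :
    1 ≤ PySem.Int.floordiv i 2 ∧ PySem.Int.floordiv i 2 < i := by
  have hdvd : (2:Int) ∣ i := (PySem.Int.mod_eq_zero_iff_dvd i 2).mp hm
  constructor
  · exact (PySem.Int.le_floordiv_iff_mul_le (by norm_num)).mpr (by omega)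
  · exact (PySem.Int.floordiv_lt_iff_lt_mul (by norm_num)).mpr (by omega)

lemma pvPick_range (c : Array Int) (i : Int) (h2 : 2 ≤ i) :
    1 ≤ pvPick c i ∧ pvPick c i < i := by
  unfold pvPick
  dsimp only
  split_ifs with ha hb hb
  · exact pvFd2_bounds i h2 hb.1
  · exact pvFd3_bounds i h2 ha.1
  · exact pvFd2_bounds i h2 hb.1
  · omega

lemma pvKeyNe (i j : Int) (hj : 1 ≤ j) (hji : j < i) : PySem.Int.toStr j ≠ PySem.Int.toStr i :=
  fun h => absurd (pvToStrInj j i (by omega) (by omega) h) (by omega)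

-- what one iteration of A's loop does: same new cost table as B, and (up to getD-view)
-- the dict gains the path of the chosen predecessor pvPick extended by i
lemma pvStepA_spec (n i : Int) (c : Array Int) (d : Std.HashMap String (List Int))
    (h2 : 2 ≤ i) (hn : i ≤ n) (hlc : c.size = (n + 1).toNat)
    (hc1 : pvAGet c (i - 1) ≤ i - 1) :
    (pvStepA n (c, d) i).1 = pvASet c i (pvAGet c (pvPick c i) + 1) ∧
    ∀ s, ((pvStepA n (c, d) i).2).getD s [] =
      (d.insert (PySem.Int.toStr i) (d.getD (PySem.Int.toStr (pvPick c i)) [] ++ [i])).getD s [] := by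
  have hi0 : (0:Int) ≤ i := by omega
  have hilen : i.toNat < c.size := by omega
  have es : ∀ v : Int, pvAGet (pvASet c i v) i = v := fun v => pvGetSet_self c i v hi0 hilen
  have en : ∀ (v j : Int), 1 ≤ j → j < i → pvAGet (pvASet c i v) j = pvAGet c j :=
    fun v j hj1 hj2 => pvGetSet_ne c i j v hi0 (by omega) (by omega)
  have hss : ∀ a b : Int, pvASet (pvASet c i a) i b = pvASet c i b := fun a b => pvSetSet c i a b
  have k1 : (PySem.Int.toStr i == PySem.Int.toStr (i - 1)) = false :=
    beq_eq_false_iff_ne.mpr (Ne.symm (pvKeyNe i (i - 1) (by omega) (by omega)))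
  unfold pvStepA
  dsimp only
  rw [if_pos (show i - 1 > 0 by omega), en (n + 1) (i - 1) (by omega) (by omega), es (n + 1),
      if_pos (show pvAGet c (i - 1) + 1 < n + 1 by omega), hss]
  by_cases hm3 : PySem.Int.mod i 3 = 0
  · obtain ⟨hf31, hf3i⟩ := pvFd3_bounds i h2 hm3
    have k3 : (PySem.Int.toStr i == PySem.Int.toStr (PySem.Int.floordiv i 3)) = false :=
      beq_eq_false_iff_ne.mpr (Ne.symm (pvKeyNe i (PySem.Int.floordiv i 3) hf31 hf3i))
    rw [if_pos hm3, en _ (PySem.Int.floordiv i 3) hf31 hf3i, es _]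
    by_cases hlt3 : pvAGet c (PySem.Int.floordiv i 3) < pvAGet c (i - 1)
    · rw [if_pos (show pvAGet c (PySem.Int.floordiv i 3) + 1 < pvAGet c (i - 1) + 1 by omega), hss]
      by_cases hm2 : PySem.Int.mod i 2 = 0
      · obtain ⟨hf21, hf2i⟩ := pvFd2_bounds i h2 hm2
        have k2 : (PySem.Int.toStr i == PySem.Int.toStr (PySem.Int.floordiv i 2)) = false :=
          beq_eq_false_iff_ne.mpr (Ne.symm (pvKeyNe i (PySem.Int.floordiv i 2) hf21 hf2i))
        rw [if_pos hm2, en _ (PySem.Int.floordiv i 2) hf21 hf2i, es _]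
        by_cases hlt2 : pvAGet c (PySem.Int.floordiv i 2) < pvAGet c (PySem.Int.floordiv i 3)
        · rw [if_pos (show pvAGet c (PySem.Int.floordiv i 2) + 1 < pvAGet c (PySem.Int.floordiv i 3) + 1 by omega), hss]
          have hpick : pvPick c i = PySem.Int.floordiv i 2 := by
            unfold pvPick; dsimp only; rw [if_pos (show PySem.Int.mod i 3 = 0 ∧ pvAGet c (PySem.Int.floordiv i 3) < pvAGet c (i - 1) from ⟨hm3, hlt3⟩), if_pos (⟨hm2, hlt2⟩ : _ ∧ _)]
          rw [hpick]
          refine ⟨rfl, fun s => ?_⟩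
          by_cases hs : s = PySem.Int.toStr i
          · simp only [Std.HashMap.getD_insert, hs, k1, k3, k2, beq_self_eq_true, Bool.false_eq_true, if_true, if_false]
          · have hsf : (PySem.Int.toStr i == s) = false := beq_eq_false_iff_ne.mpr (fun h => hs h.symm)
            simp only [Std.HashMap.getD_insert, hsf, Bool.false_eq_true, if_false]
        · rw [if_neg (show ¬ (pvAGet c (PySem.Int.floordiv i 2) + 1 < pvAGet c (PySem.Int.floordiv i 3) + 1) by omega)]
          have hpick : pvPick c i = PySem.Int.floordiv i 3 := by
            unfold pvPick; dsimp only; rw [if_pos (show PySem.Int.mod i 3 = 0 ∧ pvAGet c (PySem.Int.floordiv i 3) < pvAGet c (i - 1) from ⟨hm3, hlt3⟩), if_neg (fun h => hlt2 h.2)]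
          rw [hpick]
          refine ⟨rfl, fun s => ?_⟩
          by_cases hs : s = PySem.Int.toStr i
          · simp only [Std.HashMap.getD_insert, hs, k1, k3, beq_self_eq_true, Bool.false_eq_true, if_true, if_false]
          · have hsf : (PySem.Int.toStr i == s) = false := beq_eq_false_iff_ne.mpr (fun h => hs h.symm)
            simp only [Std.HashMap.getD_insert, hsf, Bool.false_eq_true, if_false]
      · rw [if_neg hm2]
        have hpick : pvPick c i = PySem.Int.floordiv i 3 := by
          unfold pvPick; dsimp only; rw [if_pos (show PySem.Int.mod i 3 = 0 ∧ pvAGet c (PySem.Int.floordiv i 3) < pvAGet c (i - 1) from ⟨hm3, hlt3⟩), if_neg (fun h => hm2 h.1)]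
        rw [hpick]
        refine ⟨rfl, fun s => ?_⟩
        by_cases hs : s = PySem.Int.toStr i
        · simp only [Std.HashMap.getD_insert, hs, k1, k3, beq_self_eq_true, Bool.false_eq_true, if_true, if_false]
        · have hsf : (PySem.Int.toStr i == s) = false := beq_eq_false_iff_ne.mpr (fun h => hs h.symm)
          simp only [Std.HashMap.getD_insert, hsf, Bool.false_eq_true, if_false]
    · rw [if_neg (show ¬ (pvAGet c (PySem.Int.floordiv i 3) + 1 < pvAGet c (i - 1) + 1) by omega)]
      by_cases hm2 : PySem.Int.mod i 2 = 0
      · obtain ⟨hf21, hf2i⟩ := pvFd2_bounds i h2 hm2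
        have k2 : (PySem.Int.toStr i == PySem.Int.toStr (PySem.Int.floordiv i 2)) = false :=
          beq_eq_false_iff_ne.mpr (Ne.symm (pvKeyNe i (PySem.Int.floordiv i 2) hf21 hf2i))
        rw [if_pos hm2, en _ (PySem.Int.floordiv i 2) hf21 hf2i, es _]
        by_cases hlt2 : pvAGet c (PySem.Int.floordiv i 2) < pvAGet c (i - 1)
        · rw [if_pos (show pvAGet c (PySem.Int.floordiv i 2) + 1 < pvAGet c (i - 1) + 1 by omega), hss]
          have hpick : pvPick c i = PySem.Int.floordiv i 2 := by
            unfold pvPick; dsimp only; rw [if_neg (show ¬ (PySem.Int.mod i 3 = 0 ∧ pvAGet c (PySem.Int.floordiv i 3) < pvAGet c (i - 1)) from fun h => hlt3 h.2), if_pos (⟨hm2, hlt2⟩ : _ ∧ _)]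
          rw [hpick]
          refine ⟨rfl, fun s => ?_⟩
          by_cases hs : s = PySem.Int.toStr i
          · simp only [Std.HashMap.getD_insert, hs, k1, k2, beq_self_eq_true, Bool.false_eq_true, if_true, if_false]
          · have hsf : (PySem.Int.toStr i == s) = false := beq_eq_false_iff_ne.mpr (fun h => hs h.symm)
            simp only [Std.HashMap.getD_insert, hsf, Bool.false_eq_true, if_false]
        · rw [if_neg (show ¬ (pvAGet c (PySem.Int.floordiv i 2) + 1 < pvAGet c (i - 1) + 1) by omega)]
          have hpick : pvPick c i = i - 1 := by
            unfold pvPick; dsimp only; rw [if_neg (show ¬ (PySem.Int.mod i 3 = 0 ∧ pvAGet c (PySem.Int.floordiv i 3) < pvAGet c (i - 1)) from fun h => hlt3 h.2), if_neg (fun h => hlt2 h.2)]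
          rw [hpick]
          refine ⟨rfl, fun s => ?_⟩
          by_cases hs : s = PySem.Int.toStr i
          · simp only [Std.HashMap.getD_insert, hs, k1, beq_self_eq_true, Bool.false_eq_true, if_true, if_false]
          · have hsf : (PySem.Int.toStr i == s) = false := beq_eq_false_iff_ne.mpr (fun h => hs h.symm)
            simp only [Std.HashMap.getD_insert, hsf, Bool.false_eq_true, if_false]
      · rw [if_neg hm2]
        have hpick : pvPick c i = i - 1 := by
          unfold pvPick; dsimp only; rw [if_neg (show ¬ (PySem.Int.mod i 3 = 0 ∧ pvAGet c (PySem.Int.floordiv i 3) < pvAGet c (i - 1)) from fun h => hlt3 h.2), if_neg (fun h => hm2 h.1)]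
        rw [hpick]
        refine ⟨rfl, fun s => ?_⟩
        by_cases hs : s = PySem.Int.toStr i
        · simp only [Std.HashMap.getD_insert, hs, k1, beq_self_eq_true, Bool.false_eq_true, if_true, if_false]
        · have hsf : (PySem.Int.toStr i == s) = false := beq_eq_false_iff_ne.mpr (fun h => hs h.symm)
          simp only [Std.HashMap.getD_insert, hsf, Bool.false_eq_true, if_false]
  · rw [if_neg hm3]
    by_cases hm2 : PySem.Int.mod i 2 = 0
    · obtain ⟨hf21, hf2i⟩ := pvFd2_bounds i h2 hm2
      have k2 : (PySem.Int.toStr i == PySem.Int.toStr (PySem.Int.floordiv i 2)) = false :=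
        beq_eq_false_iff_ne.mpr (Ne.symm (pvKeyNe i (PySem.Int.floordiv i 2) hf21 hf2i))
      rw [if_pos hm2, en _ (PySem.Int.floordiv i 2) hf21 hf2i, es _]
      by_cases hlt2 : pvAGet c (PySem.Int.floordiv i 2) < pvAGet c (i - 1)
      · rw [if_pos (show pvAGet c (PySem.Int.floordiv i 2) + 1 < pvAGet c (i - 1) + 1 by omega), hss]
        have hpick : pvPick c i = PySem.Int.floordiv i 2 := by
          unfold pvPick; dsimp only; rw [if_neg (show ¬ (PySem.Int.mod i 3 = 0 ∧ pvAGet c (PySem.Int.floordiv i 3) < pvAGet c (i - 1)) from fun h => hm3 h.1), if_pos (⟨hm2, hlt2⟩ : _ ∧ _)]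
        rw [hpick]
        refine ⟨rfl, fun s => ?_⟩
        by_cases hs : s = PySem.Int.toStr i
        · simp only [Std.HashMap.getD_insert, hs, k1, k2, beq_self_eq_true, Bool.false_eq_true, if_true, if_false]
        · have hsf : (PySem.Int.toStr i == s) = false := beq_eq_false_iff_ne.mpr (fun h => hs h.symm)
          simp only [Std.HashMap.getD_insert, hsf, Bool.false_eq_true, if_false]
      · rw [if_neg (show ¬ (pvAGet c (PySem.Int.floordiv i 2) + 1 < pvAGet c (i - 1) + 1) by omega)]
        have hpick : pvPick c i = i - 1 := by
          unfold pvPick; dsimp only; rw [if_neg (show ¬ (PySem.Int.mod i 3 = 0 ∧ pvAGet c (PySem.Int.floordiv i 3) < pvAGet c (i - 1)) from fun h => hm3 h.1), if_neg (fun h => hlt2 h.2)]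
        rw [hpick]
        refine ⟨rfl, fun s => ?_⟩
        by_cases hs : s = PySem.Int.toStr i
        · simp only [Std.HashMap.getD_insert, hs, k1, beq_self_eq_true, Bool.false_eq_true, if_true, if_false]
        · have hsf : (PySem.Int.toStr i == s) = false := beq_eq_false_iff_ne.mpr (fun h => hs h.symm)
          simp only [Std.HashMap.getD_insert, hsf, Bool.false_eq_true, if_false]
    · rw [if_neg hm2]
      have hpick : pvPick c i = i - 1 := by
        unfold pvPick; dsimp only; rw [if_neg (show ¬ (PySem.Int.mod i 3 = 0 ∧ pvAGet c (PySem.Int.floordiv i 3) < pvAGet c (i - 1)) from fun h => hm3 h.1), if_neg (fun h => hm2 h.1)]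
      rw [hpick]
      refine ⟨rfl, fun s => ?_⟩
      by_cases hs : s = PySem.Int.toStr i
      · simp only [Std.HashMap.getD_insert, hs, k1, beq_self_eq_true, Bool.false_eq_true, if_true, if_false]
      · have hsf : (PySem.Int.toStr i == s) = false := beq_eq_false_iff_ne.mpr (fun h => hs h.symm)
        simp only [Std.HashMap.getD_insert, hsf, Bool.false_eq_true, if_false]

lemma pvInv_step (n i : Int) (c p : Array Int) (d : Std.HashMap String (List Int))
    (h2 : 2 ≤ i) (hn : i ≤ n) (hI : pvInv n i (c, d) (c, p)) :
    pvInv n (i + 1) (pvStepA n (c, d) i) (pvStepB (c, p) i) := by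
  have hlc : c.size = (n + 1).toNat := by have h := hI.2.1; dsimp only at h; exact h
  have hc1 : pvAGet c (i - 1) ≤ i - 1 := by
    have h := hI.2.2.2.1; dsimp only at h; exact h (i - 1) (by omega) (by omega)
  obtain ⟨hA1, hAd⟩ := pvStepA_spec n i c d h2 hn hlc hc1
  obtain ⟨hp1, hpi⟩ := pvPick_range c i h2
  rw [pvStepB_eq]
  rw [show pvStepA n (c, d) i = ((pvStepA n (c, d) i).1, (pvStepA n (c, d) i).2) from rfl, hA1]
  exact pvInv_next n i (pvPick c i) c p d _ h2 hn hI hp1 hpi hAd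

lemma pvInv_init (n : Int) (h : 1 ≤ n) :
    pvInv n 2
      (pvASet (Array.replicate (n + 1).toNat (0:Int)) 1 1,
       (∅ : Std.HashMap String (List Int)).insert "1" [1])
      (pvASet (Array.replicate (n + 1).toNat (0:Int)) 1 1,
       Array.replicate (n + 1).toNat (0:Int)) := by
  have hlen : (Array.replicate (n + 1).toNat (0:Int)).size = (n + 1).toNat := Array.size_replicate
  refine ⟨rfl, ?_, ?_, ?_, ?_, ?_⟩
  · dsimp only; rw [pvLenSet]; exact hlen
  · exact hlen
  · intro j hj1 hj2
    have hj : j = 1 := by omega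
    subst hj
    dsimp only
    rw [pvGetSet_self _ 1 1 (by norm_num) (by rw [hlen]; omega)]
  · intro j hj2 hjt; omega
  · intro j hj1 hj2
    have hj : j = 1 := by omega
    subst hj
    dsimp only
    rw [show PySem.Int.toStr 1 = "1" from rfl]
    rw [show (1:Int).toNat = 1 from rfl]
    simp [pvWalk]

lemma pvInv_fold (n : Int) (h : 1 ≤ n) : ∀ m : Nat, 2 + (m : Int) ≤ n + 1 →
    pvInv n (2 + (m : Int))
      ((PySem.List.pyRange 2 (2 + (m : Int)) 1).foldl (pvStepA n)
        (pvASet (Array.replicate (n + 1).toNat (0:Int)) 1 1,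
         (∅ : Std.HashMap String (List Int)).insert "1" [1]))
      ((PySem.List.pyRange 2 (2 + (m : Int)) 1).foldl pvStepB
        (pvASet (Array.replicate (n + 1).toNat (0:Int)) 1 1,
         Array.replicate (n + 1).toNat (0:Int))) := by
  intro m
  induction m with
  | zero =>
    intro hm
    rw [show ((0:Nat):Int) = 0 from rfl, add_zero, PySem.List.pyRange_one_eq_nil (le_refl 2)]
    exact pvInv_init n h
  | succ m ih =>
    intro hm
    have e : 2 + ((m + 1 : Nat) : Int) = (2 + (m : Int)) + 1 := by push_cast; ring
    rw [e, PySem.List.pyRange_one_succ_right (show (2:Int) ≤ 2 + (m : Int) by omega),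
        List.foldl_append, List.foldl_append]
    have hI := ih (by omega)
    have h1 : ((PySem.List.pyRange 2 (2 + (m : Int)) 1).foldl (pvStepA n)
        (pvASet (Array.replicate (n + 1).toNat (0:Int)) 1 1,
         (∅ : Std.HashMap String (List Int)).insert "1" [1])).1
        = ((PySem.List.pyRange 2 (2 + (m : Int)) 1).foldl pvStepB
        (pvASet (Array.replicate (n + 1).toNat (0:Int)) 1 1,
         Array.replicate (n + 1).toNat (0:Int))).1 := hI.1
    rw [show ((PySem.List.pyRange 2 (2 + (m : Int)) 1).foldl (pvStepA n)
        (pvASet (Array.replicate (n + 1).toNat (0:Int)) 1 1,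
         (∅ : Std.HashMap String (List Int)).insert "1" [1]))
        = (((PySem.List.pyRange 2 (2 + (m : Int)) 1).foldl pvStepB
            (pvASet (Array.replicate (n + 1).toNat (0:Int)) 1 1,
             Array.replicate (n + 1).toNat (0:Int))).1,
           ((PySem.List.pyRange 2 (2 + (m : Int)) 1).foldl (pvStepA n)
            (pvASet (Array.replicate (n + 1).toNat (0:Int)) 1 1,
             (∅ : Std.HashMap String (List Int)).insert "1" [1])).2)
        from by rw [← h1]] at hI ⊢
    rw [show ((PySem.List.pyRange 2 (2 + (m : Int)) 1).foldl pvStepB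
        (pvASet (Array.replicate (n + 1).toNat (0:Int)) 1 1,
         Array.replicate (n + 1).toNat (0:Int)))
        = (((PySem.List.pyRange 2 (2 + (m : Int)) 1).foldl pvStepB
            (pvASet (Array.replicate (n + 1).toNat (0:Int)) 1 1,
             Array.replicate (n + 1).toNat (0:Int))).1,
           ((PySem.List.pyRange 2 (2 + (m : Int)) 1).foldl pvStepB
            (pvASet (Array.replicate (n + 1).toNat (0:Int)) 1 1,
             Array.replicate (n + 1).toNat (0:Int))).2)
        from rfl] at hI ⊢
    exact pvInv_step n (2 + (m : Int)) _ _ _ (by omega) (by omega) hI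

-- ===== VERDICT (by name: the statement is the Claim_ definition above) =====
theorem optimal_sequence_spec : Claim_equal_optimal_sequence := by
  intro n _ hpre
  have hp : (1:Int) ≤ n := hpre
  show optimal_sequence n = optimal_sequence_alt n
  unfold optimal_sequence optimal_sequence_alt
  dsimp only
  have hfold := pvInv_fold n hp (n - 1).toNat (by omega)
  rw [show 2 + (((n - 1).toNat : Nat) : Int) = n + 1 by omega] at hfold
  exact hfold.2.2.2.2.2 n (by omega) (by omega)
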